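-- pv_equiv track=rewrite | github.com/essaihi04/tutorAI | backend/app/services/llm_service.py | _detect_subject_from_query
-- ===== SOURCE A (Python) =====
-- def _detect_subject_from_query(query: str) -> str:
--     """Detect subject from user query for cadre de référence lookup.
--
--     Note: keywords cover BOTH on-program and off-program topics so that
--     even questions about hors-programme content (matrices, photosynthèse,
--     Schrödinger…) get the correct subject detected and the matching
--     ❌ HORS-PROGRAMME list injected. Order matters: most specific tracks
--     first.
--     """
--     q = query.lower()
--
--     # ── SVT (incl. SVT-track off-program content : photosynth/immuno/…)
--     svt_kw = [
--         "svt", "cellule", "cellulaire", "adn", "arn", "gène", "génétique", "génome",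
--         "mitose", "méiose", "chromosome", "respiration", "fermentation",
--         "glycolyse", "krebs", "atp", "muscle", "mutation", "allèle",
--         "géologie", "tectonique", "subduction", "métamorph", "chaîne de montagne",
--         "ordures", "déchet", "pollution", "recyclage",
--         # off-program SVT-track triggers (must be detected as SVT to inject HP list)
--         "photosynth", "calvin", "chlorophyl", "chloroplast",
--         "neurone", "synapse", "synaptique", "neurotransmetteur", "réflexe",
--         "immun", "lymphocyt", "anticorps", "antigène",
--         "insuline", "glucagon", "glycémie", "hormone", "hormonal",
--         "menstruel", "ovulation", "spermatozoïde", "ovaire", "testostérone",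
--         "darwin", "évolution des esp", "sélection naturelle", "phylog",
--         "écosystème", "chaîne alimentaire", "biodiversit",
--     ]
--     if any(kw in q for kw in svt_kw):
--         return "SVT"
--
--     # ── Mathematiques (incl. SM off-program : matrices, structures…)
--     math_kw = [
--         "math", "mathémat",
--         "dérivé", "dériver", "intégral", "primitive", "intégration",
--         "limite", "fonction", "fonctionn", "monoton", "continu",
--         "équation différent", "logarith", "exponent", "ln(", " e^",
--         "suite", "récurrenc", "convergen",
--         "complexe", " z ", "module", "argument",
--         "probabilité", "binomial", "loi normale", "poisson",
--         "produit scalaire", "espace", "vectoriel", "vecteur",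
--         # off-program SM triggers
--         "matric", "déterminant", "sarrus", "diagonal", "valeur propre",
--         "vecteur propre", "rang", "noyau", "kernel", "image de f",
--         "groupe", "anneau", "corps", "structure alg",
--         "congruenc", "modulo", "arithmét", "rsa",
--         "courbe paramétr", "polaire",
--         "série harmonique", "série numérique", "intégrale impropre",
--         "espace vectoriel", "applic linéaire", "application linéaire",
--     ]
--     if any(kw in q for kw in math_kw):
--         return "Mathematiques"
--
--     # ── Physique (incl. SM off-program : relativ, thermo, Maxwell…)
--     physique_kw = [
--         "physique", "onde", "circuit", "newton", "mécanique", "électricité",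
--         "optique", "force", "vitesse", "accélération", "trajectoire",
--         "champ électr", "champ magnét", "tension", "courant", "résist",
--         "condensateur", "bobine", "rc ", "rl ", "rlc", "oscillation",
--         "radioact", "noyau", "fission", "fusion", "désintégr", "demi-vie",
--         "diffraction", "interférence", "longueur d'onde",
--         # off-program triggers
--         "relativ", "lorentz", "dilatation du temps",
--         "thermodynam", "entropie", "enthalpie", "carnot",
--         "schrödinger", "schrodinger", "fonction d'onde", "quantique",
--         "ampère", "maxwell", "rotationnel", "divergence",
--         "lentille", "miroir", "foyer", "image réelle",
--         "bernoulli", "fluide", "viscosité",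
--     ]
--     if any(kw in q for kw in physique_kw):
--         return "Physique"
--
--     # ── Chimie
--     chimie_kw = [
--         "chimie", "réaction", "réactif", "produit",
--         "acide", "base", "ph ", "pka", "pkb", "pile", "électrolyse",
--         "ester", "estérif", "saponif", "anhydride",
--         "cinétique", "catalyseur", "équilibre", "constante d'équilibre",
--         "dosage", "titrage", "concentration", "molarité",
--         # off-program chimie triggers
--         "alcane", "alcène", "alcool", "aldéhyde", "cétone", "amine",
--         "iupac", "nomenclature",
--         " sn1", " sn2", " e1 ", " e2 ", "nucléophile", "électrophile",
--         "rmn", "infraroug", "spectroscop",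
--         "loi de hess", "thermochim",
--         "cristallograph", "maille", "cubique faces",
--         "michaelis", "menten",
--         "nernst", "potentiel d'électrode",
--         "henderson", "hasselbalch", "tampon",
--     ]
--     if any(kw in q for kw in chimie_kw):
--         return "Chimie"
--
--     # No match — return empty sentinel so caller can inject ALL four blocks
--     return ""
-- ===== SOURCE B (Python) =====
-- # Compact keyword table: one '|'-joined string per subject, parsed once into a
-- # flat (keyword, rank) list; detection is a single forward scan over the query
-- # keeping the minimal matching rank, via first-character buckets.
--
-- _GROUPS = [
--     ('SVT', 'svt|cellule|cellulaire|adn|arn|gène|génétique|génome|mitose|méiose|chromosome|respiration|fermentation|glycolyse|krebs|atp|muscle|mutation|allèle|géologie|tectonique|subduction|métamorph|chaîne de montagne|ordures|déchet|pollution|recyclage|photosynth|calvin|chlorophyl|chloroplast|neurone|synapse|synaptique|neurotransmetteur|réflexe|immun|lymphocyt|anticorps|antigène|insuline|glucagon|glycémie|hormone|hormonal|menstruel|ovulation|spermatozoïde|ovaire|testostérone|darwin|évolution des esp|sélection naturelle|phylog|écosystème|chaîne alimentaire|biodiversit'),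
--     ('Mathematiques', 'math|mathémat|dérivé|dériver|intégral|primitive|intégration|limite|fonction|fonctionn|monoton|continu|équation différent|logarith|exponent|ln(| e^|suite|récurrenc|convergen|complexe| z |module|argument|probabilité|binomial|loi normale|poisson|produit scalaire|espace|vectoriel|vecteur|matric|déterminant|sarrus|diagonal|valeur propre|vecteur propre|rang|noyau|kernel|image de f|groupe|anneau|corps|structure alg|congruenc|modulo|arithmét|rsa|courbe paramétr|polaire|série harmonique|série numérique|intégrale impropre|espace vectoriel|applic linéaire|application linéaire'),
--     ('Physique', "physique|onde|circuit|newton|mécanique|électricité|optique|force|vitesse|accélération|trajectoire|champ électr|champ magnét|tension|courant|résist|condensateur|bobine|rc |rl |rlc|oscillation|radioact|noyau|fission|fusion|désintégr|demi-vie|diffraction|interférence|longueur d'onde|relativ|lorentz|dilatation du temps|thermodynam|entropie|enthalpie|carnot|schrödinger|schrodinger|fonction d'onde|quantique|ampère|maxwell|rotationnel|divergence|lentille|miroir|foyer|image réelle|bernoulli|fluide|viscosité"),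
--     ('Chimie', "chimie|réaction|réactif|produit|acide|base|ph |pka|pkb|pile|électrolyse|ester|estérif|saponif|anhydride|cinétique|catalyseur|équilibre|constante d'équilibre|dosage|titrage|concentration|molarité|alcane|alcène|alcool|aldéhyde|cétone|amine|iupac|nomenclature| sn1| sn2| e1 | e2 |nucléophile|électrophile|rmn|infraroug|spectroscop|loi de hess|thermochim|cristallograph|maille|cubique faces|michaelis|menten|nernst|potentiel d'électrode|henderson|hasselbalch|tampon"),
-- ]
--
-- _TAGGED = [(kw, r) for r, (_, s) in enumerate(_GROUPS) for kw in s.split("|")]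
--
-- _NAMES = [name for name, _ in _GROUPS] + [""]
--
-- # bucket the tagged keywords by first character, so each scan position only
-- # tests the keywords that could start there
-- _BY_FIRST = {c: [p for p in _TAGGED if p[0][0] == c] for c in {kw[0] for kw, _ in _TAGGED}}
--
--
-- def _detect_subject_from_query(query: str) -> str:
--     q = query.lower()
--     best = len(_GROUPS)
--     for j in range(len(q)):
--         for kw, r in _BY_FIRST.get(q[j], ()):
--             if r < best and q.startswith(kw, j):
--                 best = r
--     return _NAMES[best]
-- ===== Notes on version B (the rewrite author's own statement) =====
-- stated objective: alternative
-- what changed: Replaces the four hard-coded keyword lists with a compact '|'-joined keyword table parsed once into a flat (keyword, rank) list, and the four sequential any(kw in q) group checks with a single forward scan over query positions that keeps the minimal matching group rank, mapped to the subject name at the end.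
import Mathlib
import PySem

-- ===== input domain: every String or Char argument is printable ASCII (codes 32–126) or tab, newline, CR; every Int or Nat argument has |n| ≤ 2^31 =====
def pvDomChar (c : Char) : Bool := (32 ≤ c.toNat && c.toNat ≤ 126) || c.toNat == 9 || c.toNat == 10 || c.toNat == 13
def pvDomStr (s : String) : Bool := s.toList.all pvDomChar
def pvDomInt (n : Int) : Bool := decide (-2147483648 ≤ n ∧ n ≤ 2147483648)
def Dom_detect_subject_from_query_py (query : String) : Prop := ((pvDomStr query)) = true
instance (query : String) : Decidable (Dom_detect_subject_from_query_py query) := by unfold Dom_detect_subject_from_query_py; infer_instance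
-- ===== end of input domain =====

-- B parses a compact '|'-joined keyword table into a flat (keyword, rank) list and replaces
-- A's four sequential any(kw in q) group checks by a single forward scan over query positions
-- keeping the minimal matching group rank; same result, alternative algorithm.

-- ===== PORT A =====
def svtKw : List String := ["svt", "cellule", "cellulaire", "adn", "arn", "gène", "génétique", "génome", "mitose", "méiose", "chromosome", "respiration", "fermentation", "glycolyse", "krebs", "atp", "muscle", "mutation", "allèle", "géologie", "tectonique", "subduction", "métamorph", "chaîne de montagne", "ordures", "déchet", "pollution", "recyclage", "photosynth", "calvin", "chlorophyl", "chloroplast", "neurone", "synapse", "synaptique", "neurotransmetteur", "réflexe", "immun", "lymphocyt", "anticorps", "antigène", "insuline", "glucagon", "glycémie", "hormone", "hormonal", "menstruel", "ovulation", "spermatozoïde", "ovaire", "testostérone", "darwin", "évolution des esp", "sélection naturelle", "phylog", "écosystème", "chaîne alimentaire", "biodiversit"]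

def mathKw : List String := ["math", "mathémat", "dérivé", "dériver", "intégral", "primitive", "intégration", "limite", "fonction", "fonctionn", "monoton", "continu", "équation différent", "logarith", "exponent", "ln(", " e^", "suite", "récurrenc", "convergen", "complexe", " z ", "module", "argument", "probabilité", "binomial", "loi normale", "poisson", "produit scalaire", "espace", "vectoriel", "vecteur", "matric", "déterminant", "sarrus", "diagonal", "valeur propre", "vecteur propre", "rang", "noyau", "kernel", "image de f", "groupe", "anneau", "corps", "structure alg", "congruenc", "modulo", "arithmét", "rsa", "courbe paramétr", "polaire", "série harmonique", "série numérique", "intégrale impropre", "espace vectoriel", "applic linéaire", "application linéaire"]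

def physiqueKw : List String := ["physique", "onde", "circuit", "newton", "mécanique", "électricité", "optique", "force", "vitesse", "accélération", "trajectoire", "champ électr", "champ magnét", "tension", "courant", "résist", "condensateur", "bobine", "rc ", "rl ", "rlc", "oscillation", "radioact", "noyau", "fission", "fusion", "désintégr", "demi-vie", "diffraction", "interférence", "longueur d'onde", "relativ", "lorentz", "dilatation du temps", "thermodynam", "entropie", "enthalpie", "carnot", "schrödinger", "schrodinger", "fonction d'onde", "quantique", "ampère", "maxwell", "rotationnel", "divergence", "lentille", "miroir", "foyer", "image réelle", "bernoulli", "fluide", "viscosité"]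

def chimieKw : List String := ["chimie", "réaction", "réactif", "produit", "acide", "base", "ph ", "pka", "pkb", "pile", "électrolyse", "ester", "estérif", "saponif", "anhydride", "cinétique", "catalyseur", "équilibre", "constante d'équilibre", "dosage", "titrage", "concentration", "molarité", "alcane", "alcène", "alcool", "aldéhyde", "cétone", "amine", "iupac", "nomenclature", " sn1", " sn2", " e1 ", " e2 ", "nucléophile", "électrophile", "rmn", "infraroug", "spectroscop", "loi de hess", "thermochim", "cristallograph", "maille", "cubique faces", "michaelis", "menten", "nernst", "potentiel d'électrode", "henderson", "hasselbalch", "tampon"]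

def detect_subject_from_query_py (query : String) : String :=
  let q := PySem.Str.lower query
  if svtKw.any (fun kw => PySem.Str.isIn kw q) then "SVT"
  else if mathKw.any (fun kw => PySem.Str.isIn kw q) then "Mathematiques"
  else if physiqueKw.any (fun kw => PySem.Str.isIn kw q) then "Physique"
  else if chimieKw.any (fun kw => PySem.Str.isIn kw q) then "Chimie"
  else ""

-- ===== PORT B =====
-- Source B's compact table: one '|'-joined keyword string per subject
def bGroups : List (String × String) :=
  [("SVT", "svt|cellule|cellulaire|adn|arn|gène|génétique|génome|mitose|méiose|chromosome|respiration|fermentation|glycolyse|krebs|atp|muscle|mutation|allèle|géologie|tectonique|subduction|métamorph|chaîne de montagne|ordures|déchet|pollution|recyclage|photosynth|calvin|chlorophyl|chloroplast|neurone|synapse|synaptique|neurotransmetteur|réflexe|immun|lymphocyt|anticorps|antigène|insuline|glucagon|glycémie|hormone|hormonal|menstruel|ovulation|spermatozoïde|ovaire|testostérone|darwin|évolution des esp|sélection naturelle|phylog|écosystème|chaîne alimentaire|biodiversit"),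
    ("Mathematiques", "math|mathémat|dérivé|dériver|intégral|primitive|intégration|limite|fonction|fonctionn|monoton|continu|équation différent|logarith|exponent|ln(| e^|suite|récurrenc|convergen|complexe| z |module|argument|probabilité|binomial|loi normale|poisson|produit scalaire|espace|vectoriel|vecteur|matric|déterminant|sarrus|diagonal|valeur propre|vecteur propre|rang|noyau|kernel|image de f|groupe|anneau|corps|structure alg|congruenc|modulo|arithmét|rsa|courbe paramétr|polaire|série harmonique|série numérique|intégrale impropre|espace vectoriel|applic linéaire|application linéaire"),
    ("Physique", "physique|onde|circuit|newton|mécanique|électricité|optique|force|vitesse|accélération|trajectoire|champ électr|champ magnét|tension|courant|résist|condensateur|bobine|rc |rl |rlc|oscillation|radioact|noyau|fission|fusion|désintégr|demi-vie|diffraction|interférence|longueur d'onde|relativ|lorentz|dilatation du temps|thermodynam|entropie|enthalpie|carnot|schrödinger|schrodinger|fonction d'onde|quantique|ampère|maxwell|rotationnel|divergence|lentille|miroir|foyer|image réelle|bernoulli|fluide|viscosité"),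
    ("Chimie", "chimie|réaction|réactif|produit|acide|base|ph |pka|pkb|pile|électrolyse|ester|estérif|saponif|anhydride|cinétique|catalyseur|équilibre|constante d'équilibre|dosage|titrage|concentration|molarité|alcane|alcène|alcool|aldéhyde|cétone|amine|iupac|nomenclature| sn1| sn2| e1 | e2 |nucléophile|électrophile|rmn|infraroug|spectroscop|loi de hess|thermochim|cristallograph|maille|cubique faces|michaelis|menten|nernst|potentiel d'électrode|henderson|hasselbalch|tampon")]

-- s.split("|") ported by hand (exact for the non-empty one-char separator "|":
-- pieces left to right, empty pieces kept — Python's str.split semantics for this sep)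
def bSplitBar : List Char → List Char → List String
  | [], cur => [String.ofList cur.reverse]
  | c :: rest, cur => if c = '|' then String.ofList cur.reverse :: bSplitBar rest [] else bSplitBar rest (c :: cur)

-- [(kw, r) for r, (_, s) in enumerate(_GROUPS) for kw in s.split("|")]
-- (enumerate's nonnegative indices are ported as zipIdx's Nat indices)
def bTagged : List (String × Nat) :=
  bGroups.zipIdx.flatMap (fun rp => (bSplitBar rp.1.2.toList []).map (fun kw => (kw, rp.2)))

-- _NAMES = [name for name, _ in _GROUPS] + [""]
def bNames : List String := bGroups.map (fun p => p.1) ++ [""]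

-- Source B's _BY_FIRST.get(c, ()): the tagged keywords whose first character is c
-- (Python builds the buckets in a dict once; .get(c, ()) returns exactly this
-- filter of _TAGGED, in order, and () = [] when no keyword starts with c).
def bBucket (c : Char) : List (String × Nat) :=
  bTagged.filter (fun p => p.1.toList.head? = some c)

-- Python's q.startswith(kw, j) for 0 ≤ j ≤ len(q) is exactly "kw is a prefix of q[j:]":
-- ported as PySem.Chars.startswith on (q.drop j) (exact on that j range; B only uses such j).
def bMatch (q : List Char) (j : Nat) (kw : String) : Bool :=
  PySem.Chars.startswith (List.drop j q) kw.toList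

def bInner (q : List Char) (j : Nat) (best : Nat) : Nat :=
  (bBucket (q.getD j ' ')).foldl (fun b p => if p.2 < b ∧ bMatch q j p.1 = true then p.2 else b) best

def detect_subject_from_query_py_alt (query : String) : String :=
  let q := (PySem.Str.lower query).toList
  let best := (List.range q.length).foldl (fun b j => bInner q j b) bGroups.length
  bNames.getD best ""

-- ===== PRECONDITION & SPEC =====
def Spec_detect_subject_from_query_py (query : String) (out : String) : Prop := out = detect_subject_from_query_py_alt query
instance (query : String) (out : String) : Decidable (Spec_detect_subject_from_query_py query out) := by unfold Spec_detect_subject_from_query_py; infer_instance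

-- ===== CLAIM (what is proved, stated in full; the proofs are below) =====
def Claim_equal_detect_subject_from_query_py : Prop := ∀ (query : String), Dom_detect_subject_from_query_py query → Spec_detect_subject_from_query_py query (detect_subject_from_query_py query)

-- ===== LEMMAS AND PROOFS =====

-- B's parsed tagged list is exactly A's four keyword lists tagged with their group rank.
-- barJoin is the proof-side inverse of bSplitBar: joining with '|' then splitting is the identity.
def barJoin : List String → String
  | [] => ""
  | [p] => p
  | p :: ps => p ++ "|" ++ barJoin ps

lemma splitBar_step (cs : List Char) (h : ('|') ∉ cs) :
    ∀ (l cur : List Char), bSplitBar (cs ++ l) cur = bSplitBar l (cs.reverse ++ cur) := by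
  induction cs with
  | nil => intro l cur; simp
  | cons c cs ih =>
    intro l cur
    have hc : c ≠ '|' := fun hcc => h (hcc ▸ List.mem_cons_self)
    have h' : ('|') ∉ cs := fun hm => h (List.mem_cons_of_mem _ hm)
    rw [List.cons_append]
    show (if c = '|' then String.ofList cur.reverse :: bSplitBar (cs ++ l) []
          else bSplitBar (cs ++ l) (c :: cur)) = _
    rw [if_neg hc, ih h' l (c :: cur)]
    simp

lemma splitBar_bar (l cur : List Char) :
    bSplitBar ('|' :: l) cur = String.ofList cur.reverse :: bSplitBar l [] := by
  show (if ('|' : Char) = '|' then _ else _) = _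
  rw [if_pos rfl]

lemma splitBar_join : ∀ (ps : List String), ps ≠ [] → (∀ p ∈ ps, ('|') ∉ p.toList) →
    bSplitBar (barJoin ps).toList [] = ps := by
  intro ps
  induction ps with
  | nil => intro h; exact absurd rfl h
  | cons p t ih =>
    intro _ hbf
    have hp : ('|') ∉ p.toList := hbf p List.mem_cons_self
    cases t with
    | nil =>
      have : bSplitBar (p.toList ++ []) [] = bSplitBar [] (p.toList.reverse ++ []) :=
        splitBar_step p.toList hp [] []
      simpa [barJoin, bSplitBar] using this
    | cons q t' =>
      have hrest : (barJoin (p :: q :: t')).toList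
          = p.toList ++ ('|' :: (barJoin (q :: t')).toList) := by
        show ((p ++ "|" ++ barJoin (q :: t')).toList) = _
        simp [String.toList_append]
      rw [hrest, splitBar_step p.toList hp _ [], splitBar_bar]
      have iht := ih (by simp) (fun r hr => hbf r (List.mem_cons_of_mem _ hr))
      rw [iht]
      simp

set_option maxRecDepth 20000 in
lemma barfree_all : ∀ kw ∈ svtKw ++ mathKw ++ physiqueKw ++ chimieKw, ('|') ∉ kw.toList := by
  decide

set_option maxRecDepth 20000 in
lemma g0_eq : ("svt|cellule|cellulaire|adn|arn|gène|génétique|génome|mitose|méiose|chromosome|respiration|fermentation|glycolyse|krebs|atp|muscle|mutation|allèle|géologie|tectonique|subduction|métamorph|chaîne de montagne|ordures|déchet|pollution|recyclage|photosynth|calvin|chlorophyl|chloroplast|neurone|synapse|synaptique|neurotransmetteur|réflexe|immun|lymphocyt|anticorps|antigène|insuline|glucagon|glycémie|hormone|hormonal|menstruel|ovulation|spermatozoïde|ovaire|testostérone|darwin|évolution des esp|sélection naturelle|phylog|écosystème|chaîne alimentaire|biodiversit" : String) = barJoin svtKw := by decide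
set_option maxRecDepth 20000 in
lemma g1_eq : ("math|mathémat|dérivé|dériver|intégral|primitive|intégration|limite|fonction|fonctionn|monoton|continu|équation différent|logarith|exponent|ln(| e^|suite|récurrenc|convergen|complexe| z |module|argument|probabilité|binomial|loi normale|poisson|produit scalaire|espace|vectoriel|vecteur|matric|déterminant|sarrus|diagonal|valeur propre|vecteur propre|rang|noyau|kernel|image de f|groupe|anneau|corps|structure alg|congruenc|modulo|arithmét|rsa|courbe paramétr|polaire|série harmonique|série numérique|intégrale impropre|espace vectoriel|applic linéaire|application linéaire" : String) = barJoin mathKw := by decide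
set_option maxRecDepth 20000 in
lemma g2_eq : ("physique|onde|circuit|newton|mécanique|électricité|optique|force|vitesse|accélération|trajectoire|champ électr|champ magnét|tension|courant|résist|condensateur|bobine|rc |rl |rlc|oscillation|radioact|noyau|fission|fusion|désintégr|demi-vie|diffraction|interférence|longueur d'onde|relativ|lorentz|dilatation du temps|thermodynam|entropie|enthalpie|carnot|schrödinger|schrodinger|fonction d'onde|quantique|ampère|maxwell|rotationnel|divergence|lentille|miroir|foyer|image réelle|bernoulli|fluide|viscosité" : String) = barJoin physiqueKw := by decide
set_option maxRecDepth 20000 in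
lemma g3_eq : ("chimie|réaction|réactif|produit|acide|base|ph |pka|pkb|pile|électrolyse|ester|estérif|saponif|anhydride|cinétique|catalyseur|équilibre|constante d'équilibre|dosage|titrage|concentration|molarité|alcane|alcène|alcool|aldéhyde|cétone|amine|iupac|nomenclature| sn1| sn2| e1 | e2 |nucléophile|électrophile|rmn|infraroug|spectroscop|loi de hess|thermochim|cristallograph|maille|cubique faces|michaelis|menten|nernst|potentiel d'électrode|henderson|hasselbalch|tampon" : String) = barJoin chimieKw := by decide

lemma bTagged_eq : bTagged
    = svtKw.map (fun kw => (kw, 0)) ++ mathKw.map (fun kw => (kw, 1))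
      ++ physiqueKw.map (fun kw => (kw, 2)) ++ chimieKw.map (fun kw => (kw, 3)) := by
  have h0 := splitBar_join svtKw (by simp [svtKw]) (fun p hp => barfree_all p (by simp [hp]))
  have h1 := splitBar_join mathKw (by simp [mathKw]) (fun p hp => barfree_all p (by simp [hp]))
  have h2 := splitBar_join physiqueKw (by simp [physiqueKw]) (fun p hp => barfree_all p (by simp [hp]))
  have h3 := splitBar_join chimieKw (by simp [chimieKw]) (fun p hp => barfree_all p (by simp [hp]))
  show (bGroups.zipIdx.flatMap
      (fun rp => (bSplitBar rp.1.2.toList []).map (fun kw => (kw, rp.2)))) = _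
  rw [show bGroups.zipIdx
      = [(("SVT", ("svt|cellule|cellulaire|adn|arn|gène|génétique|génome|mitose|méiose|chromosome|respiration|fermentation|glycolyse|krebs|atp|muscle|mutation|allèle|géologie|tectonique|subduction|métamorph|chaîne de montagne|ordures|déchet|pollution|recyclage|photosynth|calvin|chlorophyl|chloroplast|neurone|synapse|synaptique|neurotransmetteur|réflexe|immun|lymphocyt|anticorps|antigène|insuline|glucagon|glycémie|hormone|hormonal|menstruel|ovulation|spermatozoïde|ovaire|testostérone|darwin|évolution des esp|sélection naturelle|phylog|écosystème|chaîne alimentaire|biodiversit" : String)), 0), (("Mathematiques", ("math|mathémat|dérivé|dériver|intégral|primitive|intégration|limite|fonction|fonctionn|monoton|continu|équation différent|logarith|exponent|ln(| e^|suite|récurrenc|convergen|complexe| z |module|argument|probabilité|binomial|loi normale|poisson|produit scalaire|espace|vectoriel|vecteur|matric|déterminant|sarrus|diagonal|valeur propre|vecteur propre|rang|noyau|kernel|image de f|groupe|anneau|corps|structure alg|congruenc|modulo|arithmét|rsa|courbe paramétr|polaire|série harmonique|série numérique|intégrale impropre|espace vectoriel|applic linéaire|application linéaire" : String)), 1),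
         (("Physique", ("physique|onde|circuit|newton|mécanique|électricité|optique|force|vitesse|accélération|trajectoire|champ électr|champ magnét|tension|courant|résist|condensateur|bobine|rc |rl |rlc|oscillation|radioact|noyau|fission|fusion|désintégr|demi-vie|diffraction|interférence|longueur d'onde|relativ|lorentz|dilatation du temps|thermodynam|entropie|enthalpie|carnot|schrödinger|schrodinger|fonction d'onde|quantique|ampère|maxwell|rotationnel|divergence|lentille|miroir|foyer|image réelle|bernoulli|fluide|viscosité" : String)), 2), (("Chimie", ("chimie|réaction|réactif|produit|acide|base|ph |pka|pkb|pile|électrolyse|ester|estérif|saponif|anhydride|cinétique|catalyseur|équilibre|constante d'équilibre|dosage|titrage|concentration|molarité|alcane|alcène|alcool|aldéhyde|cétone|amine|iupac|nomenclature| sn1| sn2| e1 | e2 |nucléophile|électrophile|rmn|infraroug|spectroscop|loi de hess|thermochim|cristallograph|maille|cubique faces|michaelis|menten|nernst|potentiel d'électrode|henderson|hasselbalch|tampon" : String)), 3)] from rfl]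
  simp only [List.flatMap_cons, List.flatMap_nil, List.append_nil]
  rw [g0_eq, g1_eq, g2_eq, g3_eq, h0, h1, h2, h3]
  simp [List.append_assoc]

-- general form of B's inner fold, for induction
def innerF (q : List Char) (j : Nat) (L : List (String × Nat)) (b : Nat) : Nat :=
  L.foldl (fun b p => if p.2 < b ∧ bMatch q j p.1 = true then p.2 else b) b

lemma bInner_eq (q : List Char) (j b : Nat) :
    bInner q j b = innerF q j (bBucket (q.getD j ' ')) b := rfl

lemma innerF_spec (q : List Char) (j : Nat) (L : List (String × Nat)) : ∀ (b : Nat),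
    (innerF q j L b = b ∨ ∃ p ∈ L, p.2 = innerF q j L b ∧ bMatch q j p.1 = true)
    ∧ innerF q j L b ≤ b
    ∧ (∀ p ∈ L, bMatch q j p.1 = true → innerF q j L b ≤ p.2) := by
  induction L with
  | nil => intro b; simp [innerF]
  | cons p t ih =>
    intro b
    by_cases hc : p.2 < b ∧ bMatch q j p.1 = true
    · have h1 : innerF q j (p :: t) b = innerF q j t p.2 := by
        simp only [innerF, List.foldl_cons, if_pos hc]
      obtain ⟨ihA, ihB, ihC⟩ := ih p.2
      rw [h1]
      refine ⟨?_, le_trans ihB (le_of_lt hc.1), ?_⟩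
      · rcases ihA with h | ⟨p', hp', h⟩
        · exact Or.inr ⟨p, (List.mem_cons.2 (Or.inl rfl)), by rw [h]; exact ⟨rfl, hc.2⟩⟩
        · exact Or.inr ⟨p', List.mem_cons_of_mem _ hp', h⟩
      · intro p' hp' hm
        rcases List.mem_cons.1 hp' with rfl | hp'
        · exact ihB
        · exact ihC p' hp' hm
    · have h1 : innerF q j (p :: t) b = innerF q j t b := by
        simp only [innerF, List.foldl_cons, if_neg hc]
      obtain ⟨ihA, ihB, ihC⟩ := ih b
      rw [h1]
      refine ⟨?_, ihB, ?_⟩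
      · rcases ihA with h | ⟨p', hp', h⟩
        · exact Or.inl h
        · exact Or.inr ⟨p', List.mem_cons_of_mem _ hp', h⟩
      · intro p' hp' hm
        rcases List.mem_cons.1 hp' with rfl | hp'
        · have hnlt : ¬ p'.2 < b := fun hlt => hc ⟨hlt, hm⟩
          exact le_trans ihB (Nat.le_of_not_lt hnlt)
        · exact ihC p' hp' hm

-- every keyword in the tagged list is nonempty
set_option maxRecDepth 20000 in
lemma tagged_ne : ∀ p ∈ bTagged, p.1.toList ≠ [] := by
  rw [bTagged_eq]; decide

-- a keyword matching at position j < len q lives in the bucket of q[j]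
lemma mem_bucket_of_match (q : List Char) (j : Nat) (p : String × Nat)
    (hp : p ∈ bTagged) (_hj : j < q.length) (hm : bMatch q j p.1 = true) :
    p ∈ bBucket (q.getD j ' ') := by
  have hne := tagged_ne p hp
  have hpre : p.1.toList <+: List.drop j q := (PySem.Chars.startswith_iff _ _).1 hm
  cases hkw : p.1.toList with
  | nil => exact absurd hkw hne
  | cons c rest =>
    obtain ⟨t2, ht⟩ := hpre
    have hhd : (List.drop j q).head? = some c := by rw [← ht, hkw]; rfl
    have h2 : q[j]? = some c := by rw [← List.head?_drop]; exact hhd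
    have h3 : q.getD j ' ' = c := by simp [List.getD, h2]
    refine List.mem_filter.2 ⟨hp, ?_⟩
    simp only [hkw, h3, List.head?_cons, decide_eq_true_eq]

def outerF (q : List Char) (J : List Nat) (b : Nat) : Nat :=
  J.foldl (fun b j => bInner q j b) b

lemma outerF_spec (q : List Char) (J : List Nat) : ∀ (b : Nat),
    (outerF q J b = b ∨ ∃ j ∈ J, ∃ p ∈ bTagged, p.2 = outerF q J b ∧ bMatch q j p.1 = true)
    ∧ outerF q J b ≤ b
    ∧ (∀ j ∈ J, j < q.length → ∀ p ∈ bTagged, bMatch q j p.1 = true → outerF q J b ≤ p.2) := by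
  induction J with
  | nil => intro b; simp [outerF]
  | cons j t ih =>
    intro b
    have h1 : outerF q (j :: t) b = outerF q t (bInner q j b) := by
      simp only [outerF, List.foldl_cons]
    obtain ⟨iA, iB, iC⟩ := innerF_spec q j (bBucket (q.getD j ' ')) b
    obtain ⟨ihA, ihB, ihC⟩ := ih (bInner q j b)
    rw [h1]
    rw [bInner_eq] at ihA ihB ihC
    refine ⟨?_, le_trans ihB iB, ?_⟩
    · rcases ihA with h | ⟨j', hj', p', hp', h⟩
      · rw [bInner_eq, h]
        rcases iA with h' | ⟨p', hp', h'⟩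
        · exact Or.inl h'
        · exact Or.inr ⟨j, (List.mem_cons.2 (Or.inl rfl)), p',
            (List.mem_filter.1 hp').1, h'⟩
      · rw [bInner_eq]
        exact Or.inr ⟨j', List.mem_cons_of_mem _ hj', p', hp', h⟩
    · intro j' hj' hjlt p' hp' hm
      rw [bInner_eq]
      rcases List.mem_cons.1 hj' with rfl | hj'
      · exact le_trans ihB (iC p' (mem_bucket_of_match q j' p' hp' hjlt hm) hm)
      · exact ihC j' hj' hjlt p' hp' hm

-- a match witness anywhere yields one at a position j ≤ q.length
lemma match_bounded (q : List Char) (kw : String) (hne : kw.toList ≠ [])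
    (h : ∃ j, kw.toList <+: List.drop j q) :
    ∃ j ∈ List.range q.length, bMatch q j kw = true := by
  obtain ⟨j, hj⟩ := h
  have hdrop : List.drop j q ≠ [] := fun hn => hne (List.prefix_nil.1 (hn ▸ hj))
  have hlt : j < q.length := by
    by_contra hle
    exact hdrop (List.drop_eq_nil_of_le (Nat.le_of_not_lt hle))
  exact ⟨j, List.mem_range.2 hlt, (PySem.Chars.startswith_iff _ _).2 hj⟩

lemma match_iff (q : List Char) (kw : String) (hne : kw.toList ≠ []) :
    (∃ j ∈ List.range q.length, bMatch q j kw = true)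
      ↔ PySem.Chars.isIn kw.toList q = true := by
  constructor
  · rintro ⟨j, _, hm⟩
    exact (PySem.Chars.exists_prefix_drop_iff_isIn _ _).1
      ⟨j, (PySem.Chars.startswith_iff _ _).1 hm⟩
  · intro h
    exact match_bounded q kw hne ((PySem.Chars.exists_prefix_drop_iff_isIn _ _).2 h)

-- membership in the tagged list, by group
lemma mem_tagged_iff (p : String × Nat) :
    p ∈ bTagged ↔ (p.1 ∈ svtKw ∧ p.2 = 0) ∨ (p.1 ∈ mathKw ∧ p.2 = 1)
      ∨ (p.1 ∈ physiqueKw ∧ p.2 = 2) ∨ (p.1 ∈ chimieKw ∧ p.2 = 3) := by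
  rw [bTagged_eq]
  obtain ⟨s, r⟩ := p
  simp only [List.mem_append, List.mem_map, Prod.mk.injEq]
  constructor
  · rintro ((((⟨kw, h, hk, hr⟩ | ⟨kw, h, hk, hr⟩) | ⟨kw, h, hk, hr⟩) | ⟨kw, h, hk, hr⟩)) <;>
      subst hk <;> subst hr <;> simp [h]
  · rintro (⟨h, rfl⟩ | ⟨h, rfl⟩ | ⟨h, rfl⟩ | ⟨h, rfl⟩)
    · exact Or.inl (Or.inl (Or.inl ⟨s, h, rfl, rfl⟩))
    · exact Or.inl (Or.inl (Or.inr ⟨s, h, rfl, rfl⟩))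
    · exact Or.inl (Or.inr ⟨s, h, rfl, rfl⟩)
    · exact Or.inr ⟨s, h, rfl, rfl⟩

-- group-level "some keyword of g occurs in s"
def hasKw (g : List String) (s : String) : Bool :=
  g.any (fun kw => PySem.Str.isIn kw s)

lemma hasKw_iff (g : List String) (s : String) :
    hasKw g s = true ↔ ∃ kw ∈ g, PySem.Chars.isIn kw.toList s.toList = true := by
  simp [hasKw]

-- if group i has a keyword in s then B's best rank is ≤ i
lemma best_le_of_hasKw (s : String) (g : List String) (i : Nat)
    (hg : ∀ kw ∈ g, (kw, i) ∈ bTagged) (h : hasKw g s = true) :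
    outerF s.toList (List.range s.toList.length) 4 ≤ i := by
  obtain ⟨kw, hkw, hin⟩ := (hasKw_iff g s).1 h
  have hne : kw.toList ≠ [] := tagged_ne (kw, i) (hg kw hkw)
  obtain ⟨j, hj, hm⟩ := (match_iff s.toList kw hne).2 hin
  exact (outerF_spec s.toList (List.range s.toList.length) 4).2.2 j hj
    (List.mem_range.1 hj) (kw, i) (hg kw hkw) hm

theorem detect_subject_from_query_py_eq_alt (query : String) :
    detect_subject_from_query_py query = detect_subject_from_query_py_alt query := by
  show (if hasKw svtKw (PySem.Str.lower query) = true then "SVT"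
        else if hasKw mathKw (PySem.Str.lower query) = true then "Mathematiques"
        else if hasKw physiqueKw (PySem.Str.lower query) = true then "Physique"
        else if hasKw chimieKw (PySem.Str.lower query) = true then "Chimie"
        else "")
      = bNames.getD (outerF (PySem.Str.lower query).toList
          (List.range (PySem.Str.lower query).toList.length) 4) ""
  set s : String := PySem.Str.lower query with hs
  set best : Nat := outerF s.toList (List.range s.toList.length) 4 with hbest
  obtain ⟨hA, hB, -⟩ := outerF_spec s.toList (List.range s.toList.length) 4
  rw [← hbest] at hA hB
  have hWin : best ≠ 4 → ((best = 0 ∧ hasKw svtKw s = true) ∨ (best = 1 ∧ hasKw mathKw s = true)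
      ∨ (best = 2 ∧ hasKw physiqueKw s = true) ∨ (best = 3 ∧ hasKw chimieKw s = true)) := by
    intro hne
    rcases hA with h | ⟨j, hj, p, hp, hrk, hm⟩
    · exact absurd h hne
    · have hin : PySem.Chars.isIn p.1.toList s.toList = true :=
        (match_iff s.toList p.1 (tagged_ne p hp)).1 ⟨j, hj, hm⟩
      rcases (mem_tagged_iff p).1 hp with ⟨hmem, hr⟩ | ⟨hmem, hr⟩ | ⟨hmem, hr⟩ | ⟨hmem, hr⟩
      · exact Or.inl ⟨by omega, (hasKw_iff _ _).2 ⟨p.1, hmem, hin⟩⟩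
      · exact Or.inr (Or.inl ⟨by omega, (hasKw_iff _ _).2 ⟨p.1, hmem, hin⟩⟩)
      · exact Or.inr (Or.inr (Or.inl ⟨by omega, (hasKw_iff _ _).2 ⟨p.1, hmem, hin⟩⟩))
      · exact Or.inr (Or.inr (Or.inr ⟨by omega, (hasKw_iff _ _).2 ⟨p.1, hmem, hin⟩⟩))
  have hle0 : hasKw svtKw s = true → best ≤ 0 := fun h => hbest ▸
    best_le_of_hasKw s svtKw 0 (fun kw hkw => (mem_tagged_iff (kw, 0)).2 (Or.inl ⟨hkw, rfl⟩)) h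
  have hle1 : hasKw mathKw s = true → best ≤ 1 := fun h => hbest ▸
    best_le_of_hasKw s mathKw 1 (fun kw hkw => (mem_tagged_iff (kw, 1)).2 (Or.inr (Or.inl ⟨hkw, rfl⟩))) h
  have hle2 : hasKw physiqueKw s = true → best ≤ 2 := fun h => hbest ▸
    best_le_of_hasKw s physiqueKw 2
      (fun kw hkw => (mem_tagged_iff (kw, 2)).2 (Or.inr (Or.inr (Or.inl ⟨hkw, rfl⟩)))) h
  have hle3 : hasKw chimieKw s = true → best ≤ 3 := fun h => hbest ▸
    best_le_of_hasKw s chimieKw 3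
      (fun kw hkw => (mem_tagged_iff (kw, 3)).2 (Or.inr (Or.inr (Or.inr ⟨hkw, rfl⟩)))) h
  by_cases h0 : hasKw svtKw s = true
  · have hb : best = 0 := Nat.le_zero.1 (hle0 h0)
    rw [if_pos h0, hb]; rfl
  · by_cases h1 : hasKw mathKw s = true
    · have hb : best = 1 := by
        have hle := hle1 h1
        rcases hWin (by omega) with ⟨hr, h⟩ | ⟨hr, h⟩ | ⟨hr, h⟩ | ⟨hr, h⟩
        · exact absurd h h0
        · exact hr
        · omega
        · omega
      rw [if_neg h0, if_pos h1, hb]; rfl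
    · by_cases h2 : hasKw physiqueKw s = true
      · have hb : best = 2 := by
          have hle := hle2 h2
          rcases hWin (by omega) with ⟨hr, h⟩ | ⟨hr, h⟩ | ⟨hr, h⟩ | ⟨hr, h⟩
          · exact absurd h h0
          · exact absurd h h1
          · exact hr
          · omega
        rw [if_neg h0, if_neg h1, if_pos h2, hb]; rfl
      · by_cases h3 : hasKw chimieKw s = true
        · have hb : best = 3 := by
            have hle := hle3 h3
            rcases hWin (by omega) with ⟨hr, h⟩ | ⟨hr, h⟩ | ⟨hr, h⟩ | ⟨hr, h⟩
            · exact absurd h h0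
            · exact absurd h h1
            · exact absurd h h2
            · exact hr
          rw [if_neg h0, if_neg h1, if_neg h2, if_pos h3, hb]; rfl
        · have hb : best = 4 := by
            by_contra hne
            rcases hWin hne with ⟨-, h⟩ | ⟨-, h⟩ | ⟨-, h⟩ | ⟨-, h⟩
            · exact h0 h
            · exact h1 h
            · exact h2 h
            · exact h3 h
          rw [if_neg h0, if_neg h1, if_neg h2, if_neg h3, hb]; rfl

-- ===== VERDICT (by name: the statement is the Claim_ definition above) =====
theorem detect_subject_from_query_py_spec : Claim_equal_detect_subject_from_query_py := by
  intro query _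
  exact detect_subject_from_query_py_eq_alt query
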